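-- pv_equiv track=rewrite | github.com/aFachi/buscador-duplo | firebird_client.py | _find_first_existing
-- ===== SOURCE A (Python) =====
-- from typing import Dict, List, Optional, Tuple
--
-- def _find_first_existing(
--     cols: List[str], candidates: List[str]
-- ) -> Optional[str]:
--     setcols = {c.upper(): c for c in cols}
--     for cand in candidates:
--         if cand.upper() in setcols:
--             return setcols[cand.upper()]
--     return None
-- ===== SOURCE B (Python) =====
-- def _find_first_existing(cols, candidates):
--     uppers = [cand.upper() for cand in candidates]
--     best = None
--     best_rank = len(candidates)
--     for col in cols:
--         u = col.upper()
--         if u in uppers: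
--             r = uppers.index(u)
--             if r < best_rank:
--                 best, best_rank = col, r
--     return best
-- ===== Notes on version B (the rewrite author's own statement) =====
-- stated objective: alternative
-- what changed: B inverts the loop structure: instead of building an uppercase dict and iterating candidates, it precomputes the list of candidate uppercases once and makes a single pass over cols, keeping the column matched by the earliest (lowest-index) candidate; Pre_ excludes cols lists containing two case-insensitively equal but textually different columns, where A's dict last-wins choice is an accidental duplicate-key corner.
-- outside the precondition, e.g. on _find_first_existing(['Name', 'NAME'], ['name']): A returns 'NAME', B returns 'Name'
import Mathlib
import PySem

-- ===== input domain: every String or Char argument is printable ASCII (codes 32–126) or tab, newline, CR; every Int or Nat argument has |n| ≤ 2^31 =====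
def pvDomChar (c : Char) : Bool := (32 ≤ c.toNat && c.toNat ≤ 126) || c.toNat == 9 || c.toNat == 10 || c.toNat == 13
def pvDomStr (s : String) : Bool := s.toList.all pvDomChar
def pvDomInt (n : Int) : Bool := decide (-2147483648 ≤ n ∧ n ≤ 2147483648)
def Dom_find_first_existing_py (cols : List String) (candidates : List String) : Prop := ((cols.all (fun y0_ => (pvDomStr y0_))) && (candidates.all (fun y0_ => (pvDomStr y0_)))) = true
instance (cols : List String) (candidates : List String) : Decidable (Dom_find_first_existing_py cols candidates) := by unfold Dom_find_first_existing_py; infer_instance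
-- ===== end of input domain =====

-- B inverts the loops: it indexes the candidates by priority and makes one pass over cols,
-- selecting the column matched by the earliest candidate (objective: alternative decomposition).

-- ===== PORT A =====
-- setcols = {c.upper(): c for c in cols}
def pvSetcols (cols : List String) : PySem.Dict String String :=
  cols.foldl (fun d c => d.insert (PySem.Str.upper c) c) PySem.Dict.empty

-- for cand in candidates: if cand.upper() in setcols: return setcols[cand.upper()]
def pvALoop (d : PySem.Dict String String) : List String → Option String
  | [] => none
  | cand :: rest =>
    if d.contains (PySem.Str.upper cand) then d.get? (PySem.Str.upper cand)
    else pvALoop d rest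

def find_first_existing_py (cols : List String) (candidates : List String) : Option String :=
  pvALoop (pvSetcols cols) candidates

-- ===== PORT B =====
-- uppers = [cand.upper() for cand in candidates]
def pvUppers (candidates : List String) : List String :=
  candidates.map PySem.Str.upper

-- loop body: if u in uppers: r = uppers.index(u); if r < best_rank: best, best_rank = col, r
def pvBStep (uppers : List String) : Option String × Nat → String → Option String × Nat
  | (best, best_rank), col =>
    match PySem.List.index? uppers (PySem.Str.upper col) with
    | none => (best, best_rank)
    | some r => if r < best_rank then (some col, r) else (best, best_rank)

def find_first_existing_py_alt (cols : List String) (candidates : List String) : Option String :=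
  (cols.foldl (pvBStep (pvUppers candidates)) (none, candidates.length)).1

-- ===== PRECONDITION & SPEC =====
-- Pre_ excludes cols lists containing two case-insensitively equal but textually different
-- columns: which of them the function returns is an accident of A's dict overwrite order
-- (last wins) — a defensible duplicate-key corner nobody would specify either way.
def Pre_find_first_existing_py (cols : List String) (candidates : List String) : Prop :=
  List.Pairwise (fun a b => PySem.Str.upper a = PySem.Str.upper b → a = b) cols
instance (cols : List String) (candidates : List String) : Decidable (Pre_find_first_existing_py cols candidates) := by unfold Pre_find_first_existing_py; infer_instance

def pvWitness_find_first_existing_py : List String × List String :=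
  (["id", "Name"], ["missing", "NAME"])

def Spec_find_first_existing_py (cols : List String) (candidates : List String) (out : Option String) : Prop := out = find_first_existing_py_alt cols candidates
instance (cols : List String) (candidates : List String) (out : Option String) : Decidable (Spec_find_first_existing_py cols candidates out) := by unfold Spec_find_first_existing_py; infer_instance

-- ===== CLAIM (what is proved, stated in full; the proofs are below) =====
def Claim_equal_find_first_existing_py : Prop := ∀ (cols : List String) (candidates : List String), Dom_find_first_existing_py cols candidates → Pre_find_first_existing_py cols candidates → Spec_find_first_existing_py cols candidates (find_first_existing_py cols candidates)

-- ===== LEMMAS AND PROOFS =====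

-- the last-match scan that characterises a dict lookup after the building fold
def pvScan (cols : List String) (u : String) : Option String :=
  cols.foldl (fun found c => if PySem.Str.upper c == u then some c else found) none

theorem pv_get_foldl (u : String) :
    ∀ (cols : List String) (d : PySem.Dict String String) (acc : Option String),
      d.get? u = acc →
      ((cols.foldl (fun d c => d.insert (PySem.Str.upper c) c) d).get? u) =
        cols.foldl (fun found c => if PySem.Str.upper c == u then some c else found) acc := by
  intro cols
  induction cols with
  | nil => intro d acc h; simpa using h
  | cons c rest ih =>
    intro d acc h
    simp only [List.foldl_cons]
    apply ih
    rw [PySem.Dict.get?_insert]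
    by_cases hc : PySem.Str.upper c = u
    · simp [hc]
    · simp [hc, Ne.symm hc, h]

theorem pv_setcols_get (cols : List String) (u : String) :
    (pvSetcols cols).get? u = pvScan cols u := by
  unfold pvSetcols pvScan
  exact pv_get_foldl u cols PySem.Dict.empty none (by simp)

-- keep-last fold stays put when every later match equals the held value
theorem pv_keep_last (u : String) (c : String) :
    ∀ (t : List String), (∀ c' ∈ t, PySem.Str.upper c' = u → c' = c) →
      t.foldl (fun found c' => if PySem.Str.upper c' == u then some c' else found) (some c) = some c := by
  intro t
  induction t with
  | nil => intro _; rfl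
  | cons c' t' ih =>
    intro h
    have hstep : (if PySem.Str.upper c' == u then some c' else some c) = some c := by
      by_cases hc : PySem.Str.upper c' = u
      · have hcc := h c' (by simp) hc
        simp [hcc]
      · simp [hc]
    simp only [List.foldl_cons]
    rw [hstep]
    exact ih fun x hx => h x (by simp [hx])

-- under Pre_ the last case-insensitive match is also the first one
theorem pv_scan_eq_find (u : String) :
    ∀ (cols : List String),
      List.Pairwise (fun a b => PySem.Str.upper a = PySem.Str.upper b → a = b) cols →
      pvScan cols u = cols.find? (fun c => PySem.Str.upper c == u) := by
  intro cols
  induction cols with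
  | nil => intro _; rfl
  | cons c t ih =>
    intro hp
    rcases List.pairwise_cons.mp hp with ⟨h1, ht⟩
    unfold pvScan
    simp only [List.foldl_cons, List.find?_cons]
    by_cases hc : PySem.Str.upper c = u
    · simp only [hc, beq_self_eq_true, if_true]
      rw [pv_keep_last u c t (fun c' hc' hu => (h1 c' hc' (hc.trans hu.symm)).symm)]
    · simp only [show (PySem.Str.upper c == u) = false by simp [hc]]
      simp only [Bool.false_eq_true, if_false]
      exact ih ht

-- fold with best_rank 0 is inert (index? returns Nats, never < 0)
theorem pv_fold_zero (uppers : List String) :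
    ∀ (cols : List String) (b : Option String),
      cols.foldl (pvBStep uppers) (b, 0) = (b, 0) := by
  intro cols
  induction cols with
  | nil => intro b; rfl
  | cons c t ih =>
    intro b
    simp only [List.foldl_cons, pvBStep]
    cases hidx : PySem.List.index? uppers (PySem.Str.upper c) with
    | none => exact ih b
    | some r =>
      dsimp only
      rw [if_neg (Nat.not_lt_zero r)]
      exact ih b

-- empty candidate index: the fold never fires
theorem pv_fold_nil :
    ∀ (cols : List String) (st : Option String × Nat),
      cols.foldl (pvBStep []) st = st := by
  intro cols
  induction cols with
  | nil => intro st; rfl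
  | cons c t ih =>
    intro st
    obtain ⟨b, br⟩ := st
    simp only [List.foldl_cons, pvBStep, PySem.List.index?_eq_idxOf?, List.idxOf?_nil]
    exact ih (b, br)

-- if some column matches the head candidate, the fold returns the first such column
theorem pv_fold_head (u0 : String) (uppers' : List String) :
    ∀ (cols : List String) (b : Option String) (br : Nat), 0 < br →
      (∃ c ∈ cols, PySem.Str.upper c = u0) →
      (cols.foldl (pvBStep (u0 :: uppers')) (b, br)).1 =
        cols.find? (fun c => PySem.Str.upper c == u0) := by
  intro cols
  induction cols with
  | nil => intro b br _ h; exact absurd h (by simp)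
  | cons c t ih =>
    intro b br hbr hex
    simp only [List.foldl_cons, pvBStep, List.find?_cons]
    by_cases hc : PySem.Str.upper c = u0
    · simp only [hc, beq_self_eq_true, if_true, PySem.List.index?_cons_self]
      rw [if_pos hbr, pv_fold_zero]
    · have hne : u0 ≠ PySem.Str.upper c := fun hh => hc hh.symm
      have hex' : ∃ c' ∈ t, PySem.Str.upper c' = u0 := by
        rcases hex with ⟨x, hx, hux⟩
        rcases List.mem_cons.mp hx with rfl | hxt
        · exact absurd hux hc
        · exact ⟨x, hxt, hux⟩
      simp only [show (PySem.Str.upper c == u0) = false by simp [hc], Bool.false_eq_true,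
        if_false]
      rw [PySem.List.index?_cons_of_ne uppers' hne]
      cases hidx : PySem.List.index? uppers' (PySem.Str.upper c) with
      | none => simp only [Option.map_none]; exact ih b br hbr hex'
      | some r =>
        simp only [Option.map_some]
        by_cases hr : r + 1 < br
        · rw [if_pos hr]; exact ih (some c) (r + 1) (Nat.succ_pos r) hex'
        · rw [if_neg hr]; exact ih b br hbr hex'

-- if no column matches the head candidate, the fold behaves as if that candidate were absent
theorem pv_fold_shift (u0 : String) (uppers' : List String) :
    ∀ (cols : List String), (∀ c ∈ cols, PySem.Str.upper c ≠ u0) →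
      ∀ (b : Option String) (br : Nat),
        cols.foldl (pvBStep (u0 :: uppers')) (b, br + 1) =
          ((cols.foldl (pvBStep uppers') (b, br)).1,
           (cols.foldl (pvBStep uppers') (b, br)).2 + 1) := by
  intro cols
  induction cols with
  | nil => intro _ b br; rfl
  | cons c t ih =>
    intro h b br
    have hc : PySem.Str.upper c ≠ u0 := h c (by simp)
    have ht : ∀ c' ∈ t, PySem.Str.upper c' ≠ u0 := fun x hx => h x (by simp [hx])
    simp only [List.foldl_cons, pvBStep]
    rw [PySem.List.index?_cons_of_ne uppers' (fun hh => hc hh.symm)]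
    cases hidx : PySem.List.index? uppers' (PySem.Str.upper c) with
    | none => simp only [Option.map_none]; exact ih ht b br
    | some r =>
      simp only [Option.map_some]
      by_cases hr : r < br
      · rw [if_pos hr, if_pos (Nat.succ_lt_succ hr)]
        exact ih ht (some c) r
      · rw [if_neg hr, if_neg (fun hh => hr (Nat.lt_of_succ_lt_succ hh))]
        exact ih ht b br

theorem pv_main (cols : List String)
    (hpre : List.Pairwise (fun a b => PySem.Str.upper a = PySem.Str.upper b → a = b) cols) :
    ∀ (candidates : List String),
      pvALoop (pvSetcols cols) candidates =
        (cols.foldl (pvBStep (pvUppers candidates)) (none, candidates.length)).1 := by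
  intro candidates
  induction candidates with
  | nil =>
    simp only [pvALoop, pvUppers, List.map_nil, List.length_nil]
    rw [pv_fold_nil]
  | cons cand rest ih =>
    simp only [pvALoop, PySem.Dict.contains_eq_isSome_get?, pv_setcols_get,
      pv_scan_eq_find (PySem.Str.upper cand) cols hpre, pvUppers, List.map_cons,
      List.length_cons]
    by_cases hex : ∃ c ∈ cols, PySem.Str.upper c = PySem.Str.upper cand
    · have hfind : (cols.find? (fun c => PySem.Str.upper c == PySem.Str.upper cand)).isSome := by
        cases hf : cols.find? (fun c => PySem.Str.upper c == PySem.Str.upper cand) with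
        | none =>
          rcases hex with ⟨x, hx, hux⟩
          have := List.find?_eq_none.mp hf x hx
          simp [hux] at this
        | some _ => rfl
      rw [if_pos hfind]
      rw [pv_fold_head (PySem.Str.upper cand) (List.map PySem.Str.upper rest) cols none (rest.length + 1)
        (Nat.succ_pos _) hex]
    · have hnone : ∀ c ∈ cols, PySem.Str.upper c ≠ PySem.Str.upper cand := by
        intro x hx hux; exact hex ⟨x, hx, hux⟩
      have hfind : cols.find? (fun c => PySem.Str.upper c == PySem.Str.upper cand) = none := by
        rw [List.find?_eq_none]
        intro x hx; simpa using hnone x hx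
      rw [hfind]
      simp only [Option.isSome_none, Bool.false_eq_true, if_false]
      rw [pv_fold_shift (PySem.Str.upper cand) (List.map PySem.Str.upper rest) cols hnone none rest.length]
      simp only [pvUppers] at ih
      exact ih.trans rfl

-- ===== VERDICT (by name: the statement is the Claim_ definition above) =====
theorem find_first_existing_py_spec : Claim_equal_find_first_existing_py := by
  intro cols candidates _ hpre
  unfold Spec_find_first_existing_py find_first_existing_py find_first_existing_py_alt
  exact pv_main cols hpre candidates
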